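-- pv_equiv track=rewrite | github.com/sunain-s/Base-Conversion-Calculator | conversion_calc.py | hex_to_den
-- ===== SOURCE A (Python) =====
-- def hex_to_den(hexadecimal):
--     hex_list = ['0', '1', '2', '3', '4', '5', '6', '7', '8', '9', 'A', 'B', 'C', 'D', 'E', 'F']
--     denary = 0
--     power = 0
--     hexadecimal = hexadecimal[::-1]
--     for hex in hexadecimal:
--         denary += hex_list.index(hex) * 16**power
--         power += 1
--     return denary
-- ===== SOURCE B (Python) =====
-- def hex_to_den(hexadecimal):
--     denary = 0
--     for ch in hexadecimal:
--         denary = 16 * denary + ord(ch) - (48 if ch.isdigit() else 55)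
--     return denary
-- ===== Notes on version B (the rewrite author's own statement) =====
-- stated objective: simpler
-- what changed: Horner's method with direct character-code arithmetic (ord(ch)-48/-55): a single left-to-right accumulator replaces A's string reversal, per-digit list scan via hex_list.index, power counter and 16**power exponentiation.
import Mathlib
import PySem

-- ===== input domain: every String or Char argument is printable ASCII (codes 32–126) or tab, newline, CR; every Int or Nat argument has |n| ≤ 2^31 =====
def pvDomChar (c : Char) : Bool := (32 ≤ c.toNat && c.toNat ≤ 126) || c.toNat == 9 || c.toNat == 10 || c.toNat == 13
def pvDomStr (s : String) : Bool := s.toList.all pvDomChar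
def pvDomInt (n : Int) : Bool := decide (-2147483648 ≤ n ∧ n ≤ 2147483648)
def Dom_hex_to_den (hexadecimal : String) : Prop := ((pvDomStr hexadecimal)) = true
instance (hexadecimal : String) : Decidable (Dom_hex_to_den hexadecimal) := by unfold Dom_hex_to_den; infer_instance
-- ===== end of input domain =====

-- B replaces A's reversal + per-digit hex_list.index scan + 16**power by a single Horner
-- accumulator using character-code arithmetic (objective: simpler).

-- ===== PORT A =====
-- hex_list of A
def pvHexList : List Char :=
  ['0', '1', '2', '3', '4', '5', '6', '7', '8', '9', 'A', 'B', 'C', 'D', 'E', 'F']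

-- hex_list.index(hex); Python raises ValueError when absent — those inputs are excluded by Pre_,
-- so the .getD 0 default is never reached on admitted inputs.
def pvIdxA (c : Char) : Int := ((PySem.List.index? pvHexList c).getD 0 : Nat)

def hex_to_den (hexadecimal : String) : Int :=
  -- hexadecimal = hexadecimal[::-1]; then loop accumulating (denary, power)
  (hexadecimal.toList.reverse.foldl
    (fun (st : Int × Nat) c => (st.1 + pvIdxA c * (16 : Int) ^ st.2, st.2 + 1)) (0, 0)).1

-- ===== PORT B =====
-- ord(ch) - (48 if ch.isdigit() else 55)  (exact: single ASCII char, Char.isDigit = str.isdigit here)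
def pvDigitVal (c : Char) : Int := (c.toNat : Int) - (if c.isDigit then 48 else 55)

def hex_to_den_alt (hexadecimal : String) : Int :=
  hexadecimal.toList.foldl (fun denary c => 16 * denary + pvDigitVal c) 0

-- ===== PRECONDITION & SPEC =====
-- Pre_ excludes exactly the strings containing a character that is not an upper-case hex
-- digit, on which Python A's list.index raises ValueError.
def Pre_hex_to_den (hexadecimal : String) : Prop :=
  hexadecimal.toList.all (fun c => pvHexList.contains c) = true
instance (hexadecimal : String) : Decidable (Pre_hex_to_den hexadecimal) := by
  unfold Pre_hex_to_den; infer_instance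

def pvWitness_hex_to_den : String := "1A3"

def Spec_hex_to_den (hexadecimal : String) (out : Int) : Prop := out = hex_to_den_alt hexadecimal
instance (hexadecimal : String) (out : Int) : Decidable (Spec_hex_to_den hexadecimal out) := by
  unfold Spec_hex_to_den; infer_instance

-- ===== CLAIM (what is proved, stated in full; the proofs are below) =====
def Claim_equal_hex_to_den : Prop := ∀ (hexadecimal : String), Dom_hex_to_den hexadecimal → Pre_hex_to_den hexadecimal → Spec_hex_to_den hexadecimal (hex_to_den hexadecimal)

-- ===== LEMMAS AND PROOFS =====

-- on the sixteen admitted digits, A's list lookup and B's character arithmetic agree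
lemma idx_eq_val (c : Char) (h : pvHexList.contains c = true) : pvIdxA c = pvDigitVal c := by
  have hm : c ∈ pvHexList := by simpa using h
  fin_cases hm <;> decide

-- Horner's fold shifts its seed by 16^length
lemma horner_shift (l : List Char) (d : Int) :
    l.foldl (fun denary c => 16 * denary + pvDigitVal c) d
      = d * (16 : Int) ^ l.length + l.foldl (fun denary c => 16 * denary + pvDigitVal c) 0 := by
  induction l generalizing d with
  | nil => simp
  | cons c l ih =>
    simp only [List.foldl_cons, List.length_cons]
    rw [ih (16 * d + pvDigitVal c), ih (16 * 0 + pvDigitVal c)]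
    ring

-- A's foldr (= foldl over the reverse) computes Horner's value together with the length
lemma powersum_eq_horner (l : List Char) (h : ∀ c ∈ l, pvHexList.contains c = true) :
    l.foldr (fun c (st : Int × Nat) => (st.1 + pvIdxA c * (16 : Int) ^ st.2, st.2 + 1)) (0, 0)
      = (l.foldl (fun denary c => 16 * denary + pvDigitVal c) 0, l.length) := by
  induction l with
  | nil => simp
  | cons c l ih =>
    simp only [List.foldr_cons, List.foldl_cons, List.length_cons,
      ih (fun x hx => h x (List.mem_cons_of_mem _ hx))]
    refine Prod.ext ?_ rfl
    simp only
    rw [horner_shift l (16 * 0 + pvDigitVal c), idx_eq_val c (h c (List.mem_cons_self ..))]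
    ring

-- ===== VERDICT (by name: the statement is the Claim_ definition above) =====
theorem hex_to_den_spec : Claim_equal_hex_to_den := by
  intro s _ hpre
  unfold Spec_hex_to_den hex_to_den hex_to_den_alt
  rw [List.foldl_reverse]
  have h : ∀ c ∈ s.toList, pvHexList.contains c = true := by
    simpa [Pre_hex_to_den, List.all_eq_true] using hpre
  simp only [powersum_eq_horner s.toList h]
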